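-- pv_equiv track=rewrite | github.com/ndouglas/CryptoPals | break_repeating_key_xor.py | transpose_chunks
-- ===== SOURCE A (Python) =====
-- def transpose_chunks(text_chunks):
--     result = []
--     for i in range(len(text_chunks[0])):
--         this_chunk = ''
--         for chunk in text_chunks:
--             this_chunk += chunk[i] if i < len(chunk) else ''
--         result.append(this_chunk)
--     return result
-- ===== SOURCE B (Python) =====
-- def transpose_chunks(text_chunks):
--     width = len(text_chunks[0])
--     columns = [[] for _ in range(width)]
--     for chunk in text_chunks:
--         for i in range(min(len(chunk), width)):
--             columns[i].append(chunk[i])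
--     return [''.join(col) for col in columns]
-- ===== Notes on version B (the rewrite author's own statement) =====
-- stated objective: alternative
-- what changed: B transposes row-major in a single pass over the chunks, maintaining all width column accumulators simultaneously, instead of A's column-major rebuild that rescans the whole chunk list for every index of the first chunk.
import Mathlib
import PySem

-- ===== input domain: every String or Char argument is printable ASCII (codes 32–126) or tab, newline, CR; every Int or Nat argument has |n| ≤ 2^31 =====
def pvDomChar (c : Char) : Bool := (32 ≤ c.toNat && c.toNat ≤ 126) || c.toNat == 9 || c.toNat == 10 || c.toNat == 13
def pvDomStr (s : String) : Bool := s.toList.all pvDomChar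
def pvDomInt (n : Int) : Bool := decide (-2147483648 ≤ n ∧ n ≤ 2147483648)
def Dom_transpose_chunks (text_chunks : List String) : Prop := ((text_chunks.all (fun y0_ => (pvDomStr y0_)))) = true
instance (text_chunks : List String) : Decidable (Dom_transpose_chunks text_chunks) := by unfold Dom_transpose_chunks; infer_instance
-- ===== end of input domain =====

-- B transposes row-major in one pass over the chunks keeping all column accumulators at once; A builds one
-- column at a time, rescanning the whole chunk list per index of the first chunk. Return value only.

-- ===== PORT A =====
-- strings are handled as List Char throughout (Lean's own String ops are opaque to the kernel); String.ofList at the end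
def transpose_chunks (text_chunks : List String) : List String :=
  let chunks := text_chunks.map String.toList
  ((PySem.List.pyRange 0 ((chunks.headD []).length : Int) 1).foldl
    (fun result i =>
      result ++ [chunks.foldl
        (fun this_chunk chunk =>
          this_chunk ++ (if i < (chunk.length : Int) then (PySem.List.pyGet? chunk i).toList else []))
        []])
    []).map String.ofList

-- ===== PORT B =====
def transpose_chunks_alt (text_chunks : List String) : List String :=
  let chunks := text_chunks.map String.toList
  let width := (chunks.headD []).length
  (chunks.foldl
    (fun result chunk =>
      (PySem.List.pyRange 0 (min ((chunk.length : Nat) : Int) ((width : Nat) : Int)) 1).foldl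
        (fun res i => res.modify i.toNat (· ++ (PySem.List.pyGet? chunk i).toList))
        result)
    (List.replicate width [])).map String.ofList

-- ===== PRECONDITION & SPEC =====
-- Pre_ excludes the empty list, on which A (text_chunks[0]) raises IndexError; B raises there too.
def Pre_transpose_chunks (text_chunks : List String) : Prop := text_chunks ≠ []
instance (text_chunks : List String) : Decidable (Pre_transpose_chunks text_chunks) := by unfold Pre_transpose_chunks; infer_instance
def pvWitness_transpose_chunks : List String := ["abc", "de", "fghi"]

def Spec_transpose_chunks (text_chunks : List String) (out : List String) : Prop := out = transpose_chunks_alt text_chunks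
instance (text_chunks : List String) (out : List String) : Decidable (Spec_transpose_chunks text_chunks out) := by unfold Spec_transpose_chunks; infer_instance

-- ===== CLAIM (what is proved, stated in full; the proofs are below) =====
def Claim_equal_transpose_chunks : Prop := ∀ (text_chunks : List String), Dom_transpose_chunks text_chunks → Pre_transpose_chunks text_chunks → Spec_transpose_chunks text_chunks (transpose_chunks text_chunks)

-- ===== LEMMAS AND PROOFS =====

-- length is preserved by a fold of modifies
theorem pv_length_foldl_modify {α β : Type} (l : List β) (idx : β → Nat) (f : β → α → α) (res : List α) :
    (l.foldl (fun r i => r.modify (idx i) (f i)) res).length = res.length := by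
  induction l generalizing res with
  | nil => rfl
  | cons x t ih => simp [List.foldl_cons, ih, List.length_modify]

-- effect of a fold of modifies over range n on entry j
theorem pv_getElem?_foldl_modify_range {α : Type} (n : Nat) (f : Nat → α → α) (res : List α) (j : Nat) :
    ((List.range n).foldl (fun r i => r.modify i (f i)) res)[j]? =
      (if j < n then f j <$> res[j]? else res[j]?) := by
  induction n generalizing res with
  | zero => simp
  | succ n ih =>
      rw [List.range_succ, List.foldl_append]
      simp only [List.foldl_cons, List.foldl_nil, List.getElem?_modify, ih]
      by_cases h : j < n
      · simp [h, Nat.lt_succ_of_lt h, Nat.ne_of_gt h]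
      · by_cases h2 : j = n
        · subst h2; simp
        · have hlt : ¬ j < n + 1 := by omega
          have hne : n ≠ j := fun e => h2 e.symm
          simp [h, hlt, hne]

-- the contribution of B's inner loop (one chunk) to column j, for j < w = resl.length
theorem pv_getElem?_inner {α : Type} (chunk : List α) (w : Nat) (resl : List (List α))
    (j : Nat) (hj : j < w) :
    ((PySem.List.pyRange 0 (min ((chunk.length : Nat) : Int) ((w : Nat) : Int)) 1).foldl
        (fun res i => res.modify i.toNat (· ++ (PySem.List.pyGet? chunk i).toList)) resl)[j]? =
      (· ++ (chunk[j]?).toList) <$> resl[j]? := by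
  have hmin : (min ((chunk.length : Nat) : Int) ((w : Nat) : Int)) = ((min chunk.length w : Nat) : Int) := by
    omega
  rw [hmin, PySem.List.pyRange_zero_natCast, List.foldl_map]
  calc ((List.range (min chunk.length w)).foldl
          (fun r i => r.modify ((i : Int)).toNat (· ++ (PySem.List.pyGet? chunk (i : Int)).toList)) resl)[j]?
      = ((List.range (min chunk.length w)).foldl
          (fun r i => r.modify i (fun a => a ++ (chunk[i]?).toList)) resl)[j]? := by
        congr 1
        refine PySem.List.foldl_congr_mem _ _ _ _ (fun r i _ => ?_)
        simp [PySem.List.pyGet?_natCast]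
    _ = (if j < min chunk.length w then (fun a => a ++ (chunk[j]?).toList) <$> resl[j]? else resl[j]?) :=
        pv_getElem?_foldl_modify_range _ _ _ _
    _ = (· ++ (chunk[j]?).toList) <$> resl[j]? := by
        by_cases h : j < chunk.length
        · simp [Nat.lt_min.mpr ⟨h, hj⟩]
        · have h1 : ¬ j < min chunk.length w := by omega
          have h2 : chunk[j]? = none := List.getElem?_eq_none (by omega)
          simp [h1, h2]

-- B's outer fold keeps the length
theorem pv_length_outer {α : Type} (cs : List (List α)) (w : Nat) (resl : List (List α)) :
    (cs.foldl
      (fun result chunk =>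
        (PySem.List.pyRange 0 (min ((chunk.length : Nat) : Int) ((w : Nat) : Int)) 1).foldl
          (fun res i => res.modify i.toNat (· ++ (PySem.List.pyGet? chunk i).toList)) result)
      resl).length = resl.length := by
  induction cs generalizing resl with
  | nil => rfl
  | cons ch t ih =>
      rw [List.foldl_cons, ih,
          pv_length_foldl_modify _ (fun i => i.toNat) (fun i a => a ++ (PySem.List.pyGet? ch i).toList)]

-- B's outer fold, entrywise: column j collects chunk[j] over all chunks, appended to the start value
theorem pv_getElem?_outer {α : Type} (cs : List (List α)) (w : Nat) (resl : List (List α))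
    (j : Nat) (hj : j < w) (hlen : resl.length = w) :
    (cs.foldl
      (fun result chunk =>
        (PySem.List.pyRange 0 (min ((chunk.length : Nat) : Int) ((w : Nat) : Int)) 1).foldl
          (fun res i => res.modify i.toNat (· ++ (PySem.List.pyGet? chunk i).toList)) result)
      resl)[j]? =
    (· ++ cs.flatMap (fun ch => (ch[j]?).toList)) <$> resl[j]? := by
  induction cs generalizing resl with
  | nil => simp
  | cons ch t ih =>
      rw [List.foldl_cons]
      have hlen' : ((PySem.List.pyRange 0 (min ((ch.length : Nat) : Int) ((w : Nat) : Int)) 1).foldl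
          (fun res i => res.modify i.toNat (· ++ (PySem.List.pyGet? ch i).toList)) resl).length = w := by
        rw [pv_length_foldl_modify _ (fun i => i.toNat) (fun i a => a ++ (PySem.List.pyGet? ch i).toList)]
        exact hlen
      rw [ih _ hlen', pv_getElem?_inner ch w resl j hj]
      cases resl[j]? <;> simp [List.flatMap_cons]

-- A's column j equals the flatMap form
theorem pv_colA (cs : List (List Char)) (j : Nat) :
    cs.foldl
      (fun this_chunk chunk =>
        this_chunk ++ (if ((j : Nat) : Int) < (chunk.length : Int) then
          (PySem.List.pyGet? chunk ((j : Nat) : Int)).toList else []))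
      [] = cs.flatMap (fun ch => (ch[j]?).toList) := by
  have hstep : ∀ (acc : List Char) (ch : List Char), ch ∈ cs →
      acc ++ (if ((j : Nat) : Int) < (ch.length : Int) then
        (PySem.List.pyGet? ch ((j : Nat) : Int)).toList else []) = acc ++ (ch[j]?).toList := by
    intro acc ch _
    by_cases h : j < ch.length
    · simp [h]
    · have h2 : ch[j]? = none := List.getElem?_eq_none (by omega)
      simp [h2]
  rw [PySem.List.foldl_congr_mem _ _ (fun acc ch => acc ++ (ch[j]?).toList) _ hstep,
      PySem.List.foldl_append_eq_flatMap (fun ch => (ch[j]?).toList)]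
  exact List.nil_append _

-- ===== VERDICT (by name: the statement is the Claim_ definition above) =====
theorem transpose_chunks_spec : Claim_equal_transpose_chunks := by
  intro tc _ hpre
  unfold Spec_transpose_chunks
  simp only [transpose_chunks, transpose_chunks_alt]
  congr 1
  rw [PySem.List.pyRange_zero_natCast, List.foldl_map,
      PySem.List.foldl_append_singleton_eq_map, List.nil_append]
  apply List.ext_getElem?
  intro j
  set cs := tc.map String.toList with hcs
  set w := (cs.headD []).length with hw
  by_cases hj : j < w
  · rw [pv_getElem?_outer cs w (List.replicate w []) j hj (List.length_replicate)]
    rw [List.getElem?_map, List.getElem?_range hj]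
    simp only [List.getElem?_replicate, if_pos hj, Option.map_some]
    exact congrArg some ((pv_colA cs j).trans (List.nil_append _).symm)
  · rw [List.getElem?_map, List.getElem?_eq_none (by simpa using (by omega : ¬ j < w)),
        List.getElem?_eq_none (by rw [pv_length_outer cs w (List.replicate w []), List.length_replicate]; omega)]
    rfl
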